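-- pv_equiv track=rewrite | github.com/sausax/pose_estimation | python/create_pose_clusters.py | count_significant_grps
-- ===== SOURCE A (Python) =====
-- def count_significant_grps(points_map, significant_size):
--     total_size = 0
--     count = 0
--     grps = []
--     for key, val in points_map.items():
--         if len(val) >= significant_size:
--             count += 1
--             total_size += len(val)
--             grps.append(val)
--     return grps, count, total_size
-- ===== SOURCE B (Python) =====
-- def count_significant_grps(points_map, significant_size):
--     vals = list(points_map.values())
--
--     def go(lo, hi):
--         # divide and conquer over vals[lo:hi]
--         if hi - lo == 0:
--             return [], 0, 0
--         if hi - lo == 1: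
--             v = vals[lo]
--             if len(v) >= significant_size:
--                 return [v], 1, len(v)
--             return [], 0, 0
--         mid = (lo + hi) // 2
--         g1, c1, t1 = go(lo, mid)
--         g2, c2, t2 = go(mid, hi)
--         return g1 + g2, c1 + c2, t1 + t2
--
--     return go(0, len(vals))
-- ===== Notes on version B (the rewrite author's own statement) =====
-- stated objective: alternative
-- what changed: Replaces the single left-to-right accumulating loop with a divide-and-conquer recursion that splits the value list in half, solves both halves, and merges (grps, count, total) by concatenation/addition.
import Mathlib
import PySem

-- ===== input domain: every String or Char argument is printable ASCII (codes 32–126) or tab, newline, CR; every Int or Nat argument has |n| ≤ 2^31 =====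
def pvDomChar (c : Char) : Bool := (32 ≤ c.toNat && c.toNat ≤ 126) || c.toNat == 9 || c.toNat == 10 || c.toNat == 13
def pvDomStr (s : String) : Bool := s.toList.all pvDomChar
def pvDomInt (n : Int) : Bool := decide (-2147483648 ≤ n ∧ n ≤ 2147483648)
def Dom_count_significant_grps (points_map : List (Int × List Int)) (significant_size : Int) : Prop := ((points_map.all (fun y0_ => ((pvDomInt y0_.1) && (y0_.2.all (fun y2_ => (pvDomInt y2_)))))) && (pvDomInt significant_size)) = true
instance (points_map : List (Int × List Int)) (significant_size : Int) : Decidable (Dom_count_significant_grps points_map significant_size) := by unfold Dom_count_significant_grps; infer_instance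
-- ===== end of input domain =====

-- ===== PORT A =====
-- A: one fused loop accumulating (grps, count, total_size); B: divide-and-conquer over the value list
-- (return-value equivalence).
def count_significant_grps (points_map : List (Int × List Int)) (significant_size : Int) : List (List Int) × Int × Int :=
  let st := points_map.foldl (fun (st : Int × Int × List (List Int)) kv =>
    let (total_size, count, grps) := st
    let val := kv.2
    if (val.length : Int) ≥ significant_size then
      (total_size + (val.length : Int), count + 1, grps ++ [val])
    else st) (0, 0, [])
  (st.2.2, st.2.1, st.1)

-- ===== PORT B =====
-- csgGo ss l = Source B's go on the slice l of vals (indices lo/hi become the slice itself)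
def csgGo (ss : Int) : List (List Int) → List (List Int) × Int × Int
  | [] => ([], 0, 0)
  | [v] => if (v.length : Int) ≥ ss then ([v], 1, (v.length : Int)) else ([], 0, 0)
  | a :: b :: rest =>
    let l := a :: b :: rest
    let mid := l.length / 2
    let (g1, c1, t1) := csgGo ss (l.take mid)
    let (g2, c2, t2) := csgGo ss (l.drop mid)
    (g1 ++ g2, c1 + c2, t1 + t2)
termination_by l => l.length
decreasing_by
  · simp [List.length_take]; omega
  · simp [List.length_drop]; omega

def count_significant_grps_alt (points_map : List (Int × List Int)) (significant_size : Int) : List (List Int) × Int × Int :=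
  csgGo significant_size (points_map.map Prod.snd)

-- ===== PRECONDITION & SPEC =====
def Spec_count_significant_grps (points_map : List (Int × List Int)) (significant_size : Int) (out : List (List Int) × Int × Int) : Prop := out = count_significant_grps_alt points_map significant_size
instance (points_map : List (Int × List Int)) (significant_size : Int) (out : List (List Int) × Int × Int) : Decidable (Spec_count_significant_grps points_map significant_size out) := by unfold Spec_count_significant_grps; infer_instance

-- ===== CLAIM (what is proved, stated in full; the proofs are below) =====
def Claim_equal_count_significant_grps : Prop := ∀ (points_map : List (Int × List Int)) (significant_size : Int), Dom_count_significant_grps points_map significant_size → Spec_count_significant_grps points_map significant_size (count_significant_grps points_map significant_size)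

-- ===== LEMMAS AND PROOFS =====

-- ===== VERDICT (by name: the statement is the Claim_ definition above) =====
lemma csg_loop (pm : List (Int × List Int)) (ss : Int) (t c : Int) (g : List (List Int)) :
    pm.foldl (fun (st : Int × Int × List (List Int)) kv =>
      let (total_size, count, grps) := st
      let val := kv.2
      if (val.length : Int) ≥ ss then
        (total_size + (val.length : Int), count + 1, grps ++ [val])
      else st) (t, c, g) =
    (t + ((pm.map Prod.snd).filter (fun v => (v.length : Int) ≥ ss) |>.map (fun v => (v.length : Int))).sum,
     c + (((pm.map Prod.snd).filter (fun v => (v.length : Int) ≥ ss)).length : Int),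
     g ++ (pm.map Prod.snd).filter (fun v => (v.length : Int) ≥ ss)) := by
  induction pm generalizing t c g with
  | nil => simp
  | cons kv rest ih =>
    simp only [List.foldl_cons, List.map_cons, List.filter_cons]
    by_cases h : (kv.2.length : Int) ≥ ss
    · simp [h, ih, add_assoc]; omega
    · simp [h, ih]

lemma csgGo_eq (ss : Int) (l : List (List Int)) :
    csgGo ss l =
    (l.filter (fun v => (v.length : Int) ≥ ss),
     ((l.filter (fun v => (v.length : Int) ≥ ss)).length : Int),
     ((l.filter (fun v => (v.length : Int) ≥ ss)).map (fun v => (v.length : Int))).sum) := by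
  fun_induction csgGo ss l with
  | case1 => simp
  | case2 v h => simp [h]
  | case3 v h => simp [h]
  | case4 =>
    rename_i a b rest l mid g1 c1 t1 h1 g2 c2 t2 h2 ihTake ihDrop
    rw [h1] at ihTake
    rw [h2] at ihDrop
    simp only [Prod.mk.injEq] at ihTake ihDrop
    obtain ⟨e1, e2, e3⟩ := ihTake
    obtain ⟨f1, f2, f3⟩ := ihDrop
    subst e1 e2 e3 f1 f2 f3
    simp only [Prod.mk.injEq]
    have hl : List.take mid l ++ List.drop mid l = l := List.take_append_drop mid l
    generalize List.take mid l = l1 at hl ⊢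
    generalize List.drop mid l = l2 at hl ⊢
    have hl' : l1 ++ l2 = a :: b :: rest := hl
    rw [← hl']
    simp [List.filter_append]

theorem count_significant_grps_spec : Claim_equal_count_significant_grps := by
  intro pm ss _
  unfold Spec_count_significant_grps count_significant_grps count_significant_grps_alt
  simp [csg_loop, csgGo_eq]
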